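-- pv_equiv track=rewrite | github.com/MetOffice/advent-of-code | 2023/day_12/Python/springs.py | calculate_arrangements
-- ===== SOURCE A (Python) =====
-- def calculate_arrangements(string: str, arrangement_idx: int, N_quest: int) -> str:
--
--     arrangement_idx = bin(arrangement_idx)[2:].zfill(N_quest)
--     qidx = 0
--     result = ""
--     for char in string:
--         if char == "?":
--             if arrangement_idx[qidx] == "1":
--                 result += "#"
--             else:
--                 result += "."
--             qidx += 1
--         else:
--             result += char
--
--     return result
-- ===== SOURCE B (Python) =====
-- def calculate_arrangements(string: str, arrangement_idx: int, N_quest: int) -> str: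
--     bits = bin(arrangement_idx)[2:].zfill(N_quest)
--     parts = string.split("?")
--     pieces = [parts[0]]
--     for i in range(len(parts) - 1):
--         pieces.append("#" if bits[i] == "1" else ".")
--         pieces.append(parts[i + 1])
--     return "".join(pieces)
-- ===== Notes on version B (the rewrite author's own statement) =====
-- stated objective: faster
-- what changed: Replaces the per-character scan with a running qidx counter (and quadratic += string building) by split('?') plus an interleave of literal segments and bit characters over the gaps, collected in a list and joined once.
import Mathlib
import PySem

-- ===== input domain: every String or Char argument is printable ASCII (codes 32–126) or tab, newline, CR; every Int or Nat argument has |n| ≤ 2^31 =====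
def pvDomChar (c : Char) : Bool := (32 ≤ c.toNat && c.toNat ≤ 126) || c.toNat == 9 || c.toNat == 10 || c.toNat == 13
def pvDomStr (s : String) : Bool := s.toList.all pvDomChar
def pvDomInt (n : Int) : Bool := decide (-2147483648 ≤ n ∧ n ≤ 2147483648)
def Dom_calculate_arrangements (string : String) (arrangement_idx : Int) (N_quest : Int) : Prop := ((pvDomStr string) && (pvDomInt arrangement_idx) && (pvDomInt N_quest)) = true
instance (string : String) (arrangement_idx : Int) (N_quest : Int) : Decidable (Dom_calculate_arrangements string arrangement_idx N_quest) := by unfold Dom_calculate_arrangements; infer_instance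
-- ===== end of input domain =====

-- B replaces A's per-character scan with quadratic string concatenation by split('?') +
-- an interleave of segments and bit characters, joined once (measured faster).

-- ===== PORT A =====
-- literal port of A: one left-to-right pass over the characters, carrying (qidx, result)
def calculate_arrangements (string : String) (arrangement_idx : Int) (N_quest : Int) : String :=
  let bits : List Char :=
    PySem.Chars.zfill (PySem.Chars.slice (PySem.Int.toBinChars0b arrangement_idx) (some 2) none) N_quest
  let st := string.toList.foldl
    (fun (st : Int × List Char) char =>
      if char = '?' then
        (st.1 + 1, st.2 ++ [if PySem.List.pyGet? bits st.1 = some '1' then '#' else '.'])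
      else
        (st.1, st.2 ++ [char]))
    (0, [])
  String.ofList st.2

-- ===== PORT B =====
-- literal port of Source B: split on '?', interleave segment i+1 behind the i-th bit character
def calculate_arrangements_alt (string : String) (arrangement_idx : Int) (N_quest : Int) : String :=
  let bits : List Char :=
    PySem.Chars.zfill (PySem.Chars.slice (PySem.Int.toBinChars0b arrangement_idx) (some 2) none) N_quest
  let parts : List (List Char) := string.toList.splitOn '?'
  let pieces : List (List Char) :=
    (PySem.List.pyRange 0 ((parts.length : Int) - 1)).foldl
      (fun pieces i =>
        pieces ++ [[if PySem.List.pyGet? bits i = some '1' then '#' else '.'],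
                   (PySem.List.pyGet? parts (i + 1)).getD []])
      [(PySem.List.pyGet? parts 0).getD []]
  String.ofList (PySem.Chars.join [] pieces)

-- ===== PRECONDITION & SPEC =====
-- Pre_ excludes exactly the inputs where both Pythons raise IndexError: more '?' in the
-- string than there are (padded) binary digits of arrangement_idx.
def Pre_calculate_arrangements (string : String) (arrangement_idx : Int) (N_quest : Int) : Prop :=
  string.toList.count '?' ≤ max ((PySem.Int.toBinChars0b arrangement_idx).length - 2) N_quest.toNat
instance (string : String) (arrangement_idx : Int) (N_quest : Int) : Decidable (Pre_calculate_arrangements string arrangement_idx N_quest) := by unfold Pre_calculate_arrangements; infer_instance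

def pvWitness_calculate_arrangements : String × Int × Int := ("a?b?", 2, 2)

def Spec_calculate_arrangements (string : String) (arrangement_idx : Int) (N_quest : Int) (out : String) : Prop := out = calculate_arrangements_alt string arrangement_idx N_quest
instance (string : String) (arrangement_idx : Int) (N_quest : Int) (out : String) : Decidable (Spec_calculate_arrangements string arrangement_idx N_quest out) := by unfold Spec_calculate_arrangements; infer_instance

-- ===== CLAIM (what is proved, stated in full; the proofs are below) =====
def Claim_equal_calculate_arrangements : Prop := ∀ (string : String) (arrangement_idx : Int) (N_quest : Int), Dom_calculate_arrangements string arrangement_idx N_quest → Pre_calculate_arrangements string arrangement_idx N_quest → Spec_calculate_arrangements string arrangement_idx N_quest (calculate_arrangements string arrangement_idx N_quest)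

-- ===== LEMMAS AND PROOFS =====

-- the character written for the q-th '?' (both ports totalize the out-of-range read to '.')
def pvBit (bits : List Char) (q : Int) : Char :=
  if PySem.List.pyGet? bits q = some '1' then '#' else '.'

-- the common value: A's scan, written as structural recursion
def pvRender (bits : List Char) : List Char → Int → List Char
  | [], _ => []
  | c :: cs, q =>
    if c = '?' then pvBit bits q :: pvRender bits cs (q + 1) else c :: pvRender bits cs q

-- B's interleave of the segments after the first, with the bit counter threaded through
def pvG (bits : List Char) : List (List Char) → Int → List Char
  | [], _ => []
  | x :: xs, q => pvBit bits q :: (x ++ pvG bits xs (q + 1))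

lemma pvFoldA (bits : List Char) (cs : List Char) : ∀ (q : Int) (acc : List Char),
    cs.foldl
      (fun (st : Int × List Char) char =>
        if char = '?' then
          (st.1 + 1, st.2 ++ [if PySem.List.pyGet? bits st.1 = some '1' then '#' else '.'])
        else
          (st.1, st.2 ++ [char]))
      (q, acc)
    = (q + cs.count '?', acc ++ pvRender bits cs q) := by
  induction cs with
  | nil => intro q acc; simp [pvRender]
  | cons c cs ih =>
    intro q acc
    by_cases h : c = '?'
    · simp [h, pvRender, ih, pvBit]
      ring
    · simp [h, pvRender, ih]

lemma pvG_snoc (bits : List Char) (xs : List (List Char)) (x : List Char) : ∀ (q : Int),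
    pvG bits (xs ++ [x]) q = pvG bits xs q ++ pvBit bits (q + xs.length) :: x := by
  induction xs with
  | nil => intro q; simp [pvG]
  | cons y ys ih =>
    intro q
    simp only [List.cons_append, pvG, ih (q + 1), List.length_cons]
    have : q + 1 + (ys.length : Int) = q + ((ys.length : Int) + 1) := by ring
    simp [this]

lemma pvGet?_append_left {α : Type} (l l' : List α) (i : Int) (h0 : 0 ≤ i)
    (h : i < (l.length : Int)) :
    PySem.List.pyGet? (l ++ l') i = PySem.List.pyGet? l i := by
  rw [PySem.List.pyGet?_of_nonneg _ h0, PySem.List.pyGet?_of_nonneg _ h0]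
  have hlt : i.toNat < l.length := by omega
  rw [List.getElem?_append_left hlt]

lemma pvJoinNil (parts : List (List Char)) : PySem.Chars.join [] parts = parts.flatten := by
  induction parts with
  | nil => rfl
  | cons p ps ih =>
    simp only [PySem.Chars.join, List.intercalate] at *
    cases ps with
    | nil => simp
    | cons q qs => simpa using ih

lemma pvFoldB (bits : List Char) (p : List Char) : ∀ (ps : List (List Char)),
    PySem.Chars.join []
      ((PySem.List.pyRange 0 (((p :: ps).length : Int) - 1)).foldl
        (fun pieces i =>
          pieces ++ [[if PySem.List.pyGet? bits i = some '1' then '#' else '.'],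
                     (PySem.List.pyGet? (p :: ps) (i + 1)).getD []])
        [(PySem.List.pyGet? (p :: ps) 0).getD []])
    = p ++ pvG bits ps 0 := by
  intro ps
  induction ps using List.reverseRecOn with
  | nil =>
    simp [PySem.List.pyRange, pvG]
  | append_singleton xs x ih =>
    have hlen : (((p :: (xs ++ [x])).length : Int) - 1) = (xs.length : Int) + 1 := by
      simp
    rw [hlen, PySem.List.pyRange_one_append 0 (xs.length : Int) ((xs.length : Int) + 1)
          (by positivity) (by omega)]
    have hone : PySem.List.pyRange (xs.length : Int) ((xs.length : Int) + 1) = [(xs.length : Int)] :=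
      PySem.List.pyRange_one_singleton _
    rw [hone, List.foldl_append]
    -- the first xs.length steps only read inside p :: xs, so they agree with the fold on p :: xs
    have hcongr : ∀ (init : List (List Char)),
        (PySem.List.pyRange 0 (xs.length : Int)).foldl
          (fun pieces i =>
            pieces ++ [[if PySem.List.pyGet? bits i = some '1' then '#' else '.'],
                       (PySem.List.pyGet? (p :: (xs ++ [x])) (i + 1)).getD []]) init
        = (PySem.List.pyRange 0 (xs.length : Int)).foldl
          (fun pieces i =>
            pieces ++ [[if PySem.List.pyGet? bits i = some '1' then '#' else '.'],
                       (PySem.List.pyGet? (p :: xs) (i + 1)).getD []]) init := by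
      intro init
      refine PySem.List.foldl_congr_mem _ _ _ _ ?_
      intro acc i hi
      have hi' := PySem.List.mem_pyRange_one.mp hi
      have : PySem.List.pyGet? (p :: (xs ++ [x])) (i + 1) = PySem.List.pyGet? (p :: xs) (i + 1) := by
        have : (p :: (xs ++ [x])) = (p :: xs) ++ [x] := by simp
        rw [this, pvGet?_append_left]
        · omega
        · simp; omega
      rw [this]
    have hzero : PySem.List.pyGet? (p :: (xs ++ [x])) 0 = PySem.List.pyGet? (p :: xs) 0 := by
      rw [PySem.List.pyGet?_zero_cons, PySem.List.pyGet?_zero_cons]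
    have hlast : PySem.List.pyGet? (p :: (xs ++ [x])) ((xs.length : Int) + 1) = some x := by
      have h1 : (p :: (xs ++ [x])) = (p :: xs) ++ x :: [] := by simp
      have h2 : ((xs.length : Int) + 1) = (((p :: xs).length : Int)) := by simp
      rw [h1, h2, PySem.List.pyGet?_append_length]
    rw [hzero, hcongr]
    rw [pvJoinNil] at ih ⊢
    have hlen2 : (((p :: xs).length : Int) - 1) = (xs.length : Int) := by simp
    rw [hlen2] at ih
    simp only [List.foldl_cons, List.foldl_nil, hlast, List.flatten_append, ih]
    rw [pvG_snoc bits xs x 0]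
    simp [pvBit]

lemma pvSplitRender (bits : List Char) (cs : List Char) : ∀ (q : Int),
    ((cs.splitOn '?').headD []) ++ pvG bits ((cs.splitOn '?').tail) q = pvRender bits cs q := by
  induction cs with
  | nil => intro q; simp [List.splitOn_nil, pvG, pvRender]
  | cons c cs ih =>
    intro q
    have hsplit : (c :: cs).splitOn '?' = if c == '?' then [] :: cs.splitOn '?'
        else (cs.splitOn '?').modifyHead (List.cons c) := by
      simp only [List.splitOn]
      exact List.splitOnP_cons _ c cs
    obtain ⟨p', ps', h'⟩ := List.exists_cons_of_ne_nil (List.splitOnP_ne_nil (· == '?') cs)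
    have h'' : cs.splitOn '?' = p' :: ps' := h'
    have hih := ih (q + 1)
    have hih' := ih q
    rw [h''] at hih hih'
    simp only [List.headD, List.tail] at hih hih'
    by_cases h : c = '?'
    · rw [hsplit]
      simp only [h, beq_self_eq_true, if_true, h'']
      show [] ++ pvG bits (p' :: ps') q = pvRender bits ('?' :: cs) q
      simp [List.nil_append, pvG, pvRender, hih]
    · rw [hsplit]
      have hbeq : (c == '?') = false := by simp [h]
      simp only [hbeq, Bool.false_eq_true, if_false, h'', List.modifyHead]
      show (c :: p') ++ pvG bits ps' q = pvRender bits (c :: cs) q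
      simp only [List.cons_append, pvRender, if_neg h, hih']

-- ===== VERDICT (by name: the statement is the Claim_ definition above) =====
theorem calculate_arrangements_spec : Claim_equal_calculate_arrangements := by
  intro string arrangement_idx N_quest _ _
  unfold Spec_calculate_arrangements calculate_arrangements calculate_arrangements_alt
  set bits := PySem.Chars.zfill (PySem.Chars.slice (PySem.Int.toBinChars0b arrangement_idx) (some 2) none) N_quest with hbits
  simp only []
  obtain ⟨p, ps, hs⟩ := List.exists_cons_of_ne_nil (List.splitOnP_ne_nil (· == '?') string.toList)
  have hs' : string.toList.splitOn '?' = p :: ps := hs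
  rw [pvFoldA bits string.toList 0 [], hs', pvFoldB bits p ps]
  have := pvSplitRender bits string.toList 0
  rw [hs'] at this
  simp only [List.headD, List.tail] at this
  simp [this]
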